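-- pv_equiv track=rewrite | github.com/Pkpallaw16/Data-Structure-And-Algorithms | 18 Dynamic programming/22Tiling With M _1 Tiles.py | Tiling_With_Tiles
-- ===== SOURCE A (Python) =====
-- def Tiling_With_Tiles(n,m):
--     if n==1:
--         return 1
--     if n==m:
--         return 2
--     count=0
--     count+=Tiling_With_Tiles(n-1,m)
--     if n-m>=0:
--         count+=Tiling_With_Tiles(n-m,m)
--     return count
-- ===== SOURCE B (Python) =====
-- def Tiling_With_Tiles(n, m):
--     # bottom-up DP over the recurrence f(k) = f(k-1) + f(k-m), O(n) instead of O(2^n)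
--     if n == 1:
--         return 1
--     if n == m:
--         return 2
--     dp = []
--     for k in range(1, n + 1):
--         if k == 1:
--             dp.append(1)
--         elif k == m:
--             dp.append(2)
--         elif k < m:
--             dp.append(1)
--         else:
--             dp.append(dp[-1] + dp[-m])
--     return dp[-1]
-- ===== Notes on version B (the rewrite author's own statement) =====
-- stated objective: faster
-- what changed: Replaced A's exponential top-down recursion f(n)=f(n-1)+f(n-m) with a bottom-up dynamic-programming table filled once from 1 to n, changing O(2^n) time to O(n).
-- outside the precondition, e.g. on Tiling_With_Tiles(0, -1): A returns 3, B raises IndexError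
import Mathlib
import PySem

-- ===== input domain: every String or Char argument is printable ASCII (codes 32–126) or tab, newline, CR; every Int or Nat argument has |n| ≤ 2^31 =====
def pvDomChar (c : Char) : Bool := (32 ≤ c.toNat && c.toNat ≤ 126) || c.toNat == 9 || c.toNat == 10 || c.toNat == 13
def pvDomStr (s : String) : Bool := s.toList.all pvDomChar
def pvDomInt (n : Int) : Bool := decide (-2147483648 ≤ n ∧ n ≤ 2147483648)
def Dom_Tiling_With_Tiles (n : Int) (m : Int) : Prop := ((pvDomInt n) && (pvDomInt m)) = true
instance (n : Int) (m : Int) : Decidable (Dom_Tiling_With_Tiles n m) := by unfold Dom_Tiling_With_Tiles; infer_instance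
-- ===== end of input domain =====

-- B replaces A's exponential top-down recursion by a bottom-up O(n) DP table; equal on Pre_.

-- ===== PORT A =====
-- A's recursion is not structural, so it is ported with a fuel parameter; fuel n.toNat + 1
-- bounds the recursion depth on every input admitted by Pre_ (each call decreases n by ≥ 1).
def pvTilingFuel : Nat → Int → Int → Int
  | 0, _, _ => 0
  | fuel+1, n, m =>
    if n = 1 then 1
    else if n = m then 2
    else if n - m ≥ 0 then pvTilingFuel fuel (n-1) m + pvTilingFuel fuel (n-m) m
    else pvTilingFuel fuel (n-1) m

def Tiling_With_Tiles (n : Int) (m : Int) : Int := pvTilingFuel (n.toNat + 1) n m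

-- ===== PORT B =====
def Tiling_With_Tiles_alt (n : Int) (m : Int) : Int :=
  if n = 1 then 1
  else if n = m then 2
  else
    -- Python list + append is ported as Array + push; the negative Python indices dp[-1] and
    -- dp[-m] are ported by hand as size-1 and size-m.toNat, exact here because whenever they are
    -- read the list has size ≥ 1 resp. ≥ m (k > m ≥ 1 in that branch), and at the final dp[-1]
    -- the list is nonempty for every input admitted by Pre_ that reaches this branch.
    let dp := (PySem.List.pyRange 1 (n + 1) 1).foldl (fun (dp : Array Int) k =>
      if k = 1 then dp.push 1
      else if k = m then dp.push 2
      else if k < m then dp.push 1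
      else dp.push (dp.getD (dp.size - 1) 0 + dp.getD (dp.size - m.toNat) 0)) (#[] : Array Int)
    dp.getD (dp.size - 1) 0

-- ===== PRECONDITION & SPEC =====
-- Pre_ excludes inputs with n ≤ 0 or m ≤ 0 (other than n = 1 or n = m), where A's unbounded
-- recursion either raises RecursionError or only accidentally bottoms out on its base cases.
def Pre_Tiling_With_Tiles (n : Int) (m : Int) : Prop := (1 ≤ n ∧ 1 ≤ m) ∨ n = 1 ∨ n = m
instance (n : Int) (m : Int) : Decidable (Pre_Tiling_With_Tiles n m) := by
  unfold Pre_Tiling_With_Tiles; infer_instance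
def pvWitness_Tiling_With_Tiles : Int × Int := (5, 2)

def Spec_Tiling_With_Tiles (n : Int) (m : Int) (out : Int) : Prop := out = Tiling_With_Tiles_alt n m
instance (n : Int) (m : Int) (out : Int) : Decidable (Spec_Tiling_With_Tiles n m out) := by
  unfold Spec_Tiling_With_Tiles; infer_instance

-- ===== CLAIM (what is proved, stated in full; the proofs are below) =====
def Claim_equal_Tiling_With_Tiles : Prop := ∀ (n : Int) (m : Int), Dom_Tiling_With_Tiles n m → Pre_Tiling_With_Tiles n m → Spec_Tiling_With_Tiles n m (Tiling_With_Tiles n m)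

-- ===== LEMMAS AND PROOFS =====

-- Any fuel ≥ n.toNat computes the same value (for 1 ≤ n, 1 ≤ m).
theorem pvFuel_irrel : ∀ (k : Nat) (n m : Int), 1 ≤ m → 1 ≤ n → n.toNat ≤ k →
    ∀ (f1 f2 : Nat), n.toNat ≤ f1 → n.toNat ≤ f2 →
    pvTilingFuel f1 n m = pvTilingFuel f2 n m := by
  intro k
  induction k using Nat.strong_induction_on with
  | _ k ih =>
    intro n m hm hn hk f1 f2 h1 h2
    cases f1 with
    | zero => omega
    | succ g1 =>
      cases f2 with
      | zero => omega
      | succ g2 =>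
        by_cases h1' : n = 1
        · simp [pvTilingFuel, h1']
        · by_cases hnm : n = m
          · simp [pvTilingFuel, hnm]
          · have hn2 : 2 ≤ n := by omega
            have e1 : pvTilingFuel g1 (n-1) m = pvTilingFuel g2 (n-1) m := by
              exact ih (n-1).toNat (by omega) (n-1) m hm (by omega) (le_refl _)
                g1 g2 (by omega) (by omega)
            by_cases hge : n - m ≥ 0
            · have hge1 : 1 ≤ n - m := by omega
              have e2 : pvTilingFuel g1 (n-m) m = pvTilingFuel g2 (n-m) m := by
                exact ih (n-m).toNat (by omega) (n-m) m hm hge1 (le_refl _)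
                  g1 g2 (by omega) (by omega)
              simp [pvTilingFuel, h1', hnm, e1, e2]
            · have hlt : ¬ m ≤ n := by omega
              simp [pvTilingFuel, h1', hnm, e1, hlt]

theorem pvA_one (m : Int) : Tiling_With_Tiles 1 m = 1 := by
  simp [Tiling_With_Tiles, pvTilingFuel]

theorem pvA_diag (n : Int) (h : n ≠ 1) : Tiling_With_Tiles n n = 2 := by
  simp [Tiling_With_Tiles, pvTilingFuel, h]

theorem pvA_rec (n m : Int) (hm : 1 ≤ m) (hn : 2 ≤ n) (hne : n ≠ m) :
    Tiling_With_Tiles n m =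
      Tiling_With_Tiles (n-1) m + (if m ≤ n then Tiling_With_Tiles (n-m) m else 0) := by
  have h1 : n ≠ 1 := by omega
  have e1 : pvTilingFuel n.toNat (n-1) m = pvTilingFuel ((n-1).toNat + 1) (n-1) m :=
    pvFuel_irrel (n-1).toNat (n-1) m hm (by omega) (le_refl _) n.toNat ((n-1).toNat + 1)
      (by omega) (by omega)
  by_cases hge : m ≤ n
  · have hge' : n - m ≥ 0 := by omega
    have e2 : pvTilingFuel n.toNat (n-m) m = pvTilingFuel ((n-m).toNat + 1) (n-m) m :=
      pvFuel_irrel (n-m).toNat (n-m) m hm (by omega) (le_refl _) n.toNat ((n-m).toNat + 1)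
        (by omega) (by omega)
    simp [Tiling_With_Tiles, pvTilingFuel, h1, hne, hge, e1, e2]
  · have hge' : ¬ (n - m ≥ 0) := by omega
    simp [Tiling_With_Tiles, pvTilingFuel, h1, hne, hge, e1]

-- below the m-width tile never fits: the count is 1
theorem pvA_small (m : Int) : ∀ (k : Nat) (n : Int), n.toNat = k → 1 ≤ n → n < m →
    Tiling_With_Tiles n m = 1 := by
  intro k
  induction k using Nat.strong_induction_on with
  | _ k ih =>
    intro n hk hn hlt
    by_cases h1 : n = 1
    · rw [h1, pvA_one]
    · have hm : 1 ≤ m := by omega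
      rw [pvA_rec n m hm (by omega) (by omega), if_neg (by omega),
        ih (n-1).toNat (by omega) (n-1) rfl (by omega) (by omega)]
      norm_num

-- reading a position of an appended array
theorem pvGetD_push (a : Array Int) (v : Int) (i : Nat) :
    (a.push v).getD i 0 = if i = a.size then v else a.getD i 0 := by
  rcases lt_trichotomy i a.size with h|h|h
  · rw [Array.getD_eq_getD_getElem?, Array.getD_eq_getD_getElem?, if_neg (by omega),
      Array.getElem?_push_lt h, Array.getElem?_eq_getElem h]
  · rw [Array.getD_eq_getD_getElem?, if_pos h, h, Array.getElem?_push_size]; rfl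
  · rw [Array.getD_eq_getD_getElem?, Array.getD_eq_getD_getElem?, if_neg (by omega)]
    rw [Array.getElem?_eq_none (by simp [Array.size_push]; omega), Array.getElem?_eq_none (by omega)]

-- loop invariant of B's DP table: after processing 1..j, slot k holds A's value for 1 ≤ k ≤ j
theorem pvB_invariant (n m : Int) (hm : 1 ≤ m) (hn : 2 ≤ n) :
    ∀ j : Int, 0 ≤ j → j ≤ n →
      ((PySem.List.pyRange 1 (j + 1) 1).foldl (fun (dp : Array Int) k =>
        if k = 1 then dp.push 1
        else if k = m then dp.push 2
        else if k < m then dp.push 1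
        else dp.push (dp.getD (dp.size - 1) 0 + dp.getD (dp.size - m.toNat) 0))
        (#[] : Array Int)).size = j.toNat ∧
      ∀ k : Int, 1 ≤ k → k ≤ j →
        ((PySem.List.pyRange 1 (j + 1) 1).foldl (fun (dp : Array Int) k =>
          if k = 1 then dp.push 1
          else if k = m then dp.push 2
          else if k < m then dp.push 1
          else dp.push (dp.getD (dp.size - 1) 0 + dp.getD (dp.size - m.toNat) 0))
          (#[] : Array Int)).getD (k.toNat - 1) 0 = Tiling_With_Tiles k m := by
  intro j hj0
  induction j, hj0 using Int.le_induction with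
  | base =>
    intro _
    refine ⟨by rw [PySem.List.pyRange_one_eq_nil (by omega)]; rfl, ?_⟩
    intro k hk1 hk2; omega
  | succ j hj ih =>
    intro hjn
    obtain ⟨ihlen, ihval⟩ := ih (by omega)
    -- the value appended at step j+1 equals A (j+1) m, given the table is correct up to j
    have hval : ∀ d : Array Int, d.size = j.toNat →
        (∀ k : Int, 1 ≤ k → k ≤ j → d.getD (k.toNat - 1) 0 = Tiling_With_Tiles k m) →
        (if j + 1 = 1 then d.push 1
         else if j + 1 = m then d.push 2
         else if j + 1 < m then d.push 1
         else d.push (d.getD (d.size - 1) 0 + d.getD (d.size - m.toNat) 0))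
        = d.push (Tiling_With_Tiles (j + 1) m) := by
      intro d hsz hd
      by_cases h1 : j + 1 = 1
      · rw [if_pos h1, h1, pvA_one]
      · rw [if_neg h1]
        by_cases h2 : j + 1 = m
        · rw [if_pos h2, h2, pvA_diag m (by omega)]
        · rw [if_neg h2]
          by_cases h3 : j + 1 < m
          · rw [if_pos h3, pvA_small m (j+1).toNat (j+1) rfl (by omega) h3]
          · rw [if_neg h3, pvA_rec (j + 1) m hm (by omega) h2, if_pos (by omega), hsz]
            rw [hd j (by omega) (le_refl j)]
            rw [show j.toNat - m.toNat = (j + 1 - m).toNat - 1 from by omega]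
            rw [hd (j + 1 - m) (by omega) (by omega)]
            rw [show j + 1 - 1 = j from by ring_nf]
    rw [PySem.List.pyRange_one_succ_right (by omega : (1:Int) ≤ j + 1), List.foldl_append,
      List.foldl_cons, List.foldl_nil]
    beta_reduce
    rw [hval _ ihlen ihval]
    refine ⟨by rw [Array.size_push, ihlen]; omega, ?_⟩
    intro k hk1 hk2
    rw [pvGetD_push]
    by_cases hkj : k = j + 1
    · rw [if_pos (by omega), hkj]
    · rw [if_neg (by omega), ihval k hk1 (by omega)]

-- ===== VERDICT (by name: the statement is the Claim_ definition above) =====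
theorem Tiling_With_Tiles_spec : Claim_equal_Tiling_With_Tiles := by
  intro n m _ hpre
  unfold Spec_Tiling_With_Tiles
  by_cases h1 : n = 1
  · rw [h1, pvA_one]
    simp [Tiling_With_Tiles_alt]
  · by_cases h2 : n = m
    · subst h2
      rw [pvA_diag n h1]
      simp [Tiling_With_Tiles_alt, h1]
    · have hn : 1 ≤ n ∧ 1 ≤ m := by
        rcases hpre with h | h | h
        · exact h
        · omega
        · omega
      have hn2 : 2 ≤ n := by omega
      obtain ⟨hlen, hinv⟩ := pvB_invariant n m hn.2 hn2 n (by omega) (le_refl n)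
      rw [Tiling_With_Tiles_alt]
      simp only [if_neg h1, if_neg h2]
      rw [hlen]
      exact (hinv n (by omega) (le_refl n)).symm
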